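-- pv_equiv track=rewrite | github.com/willwng/AoC2021 | _15/viz.py | create_big_row
-- ===== SOURCE A (Python) =====
-- def create_big_row(row, n):
--     new_row = [a for a in row]
--     for _ in range(n):
--         for i in range(len(new_row)):
--             new_row[i] += 1
--             if new_row[i] > 9:
--                 new_row[i] = 1
--     return new_row
-- ===== SOURCE B (Python) =====
-- def create_big_row(row, n):
--     # O(len(row)) closed form: apply one increment-with-wrap step, after which
--     # every value is at most 9; the remaining n-1 increments either stay below
--     # the wrap point or rotate around the 9-cycle, which a modular formula gives.
--     if n <= 0:
--         return list(row)
--     first = [v + 1 if v < 9 else 1 for v in row]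
--     m = n - 1
--     return [v + m if v + m <= 9 else (v + m - 1) % 9 + 1 for v in first]
-- ===== Notes on version B (the rewrite author's own statement) =====
-- stated objective: faster
-- what changed: Replaces A's n simulation rounds by one increment-with-wrap pass followed by a closed-form modular rotation of the 9-cycle, computing each element's final value directly.
import Mathlib
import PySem

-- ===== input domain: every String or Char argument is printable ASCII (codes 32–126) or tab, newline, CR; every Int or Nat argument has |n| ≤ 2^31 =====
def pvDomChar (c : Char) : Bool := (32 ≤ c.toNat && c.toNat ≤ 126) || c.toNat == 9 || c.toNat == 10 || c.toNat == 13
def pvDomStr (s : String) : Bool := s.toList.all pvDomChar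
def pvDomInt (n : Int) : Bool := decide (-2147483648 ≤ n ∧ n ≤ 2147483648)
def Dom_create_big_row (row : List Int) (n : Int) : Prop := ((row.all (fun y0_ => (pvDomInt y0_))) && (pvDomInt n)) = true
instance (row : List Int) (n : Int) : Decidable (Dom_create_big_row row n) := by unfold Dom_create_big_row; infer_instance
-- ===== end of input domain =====

-- B replaces A's n simulation rounds by one increment-with-wrap pass plus a closed-form modular rotation (O(len) instead of O(n·len)).

-- ===== PORT A =====
def create_big_row (row : List Int) (n : Int) : List Int :=
  let new_row := row.map (fun a => a)
  (PySem.List.pyRange 0 n 1).foldl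
    (fun nr _ =>
      (PySem.List.pyRange 0 (nr.length : Int) 1).foldl
        (fun cur i =>
          let cur1 := PySem.List.pySetD cur i (PySem.List.pyGetD cur i 0 + 1)
          if PySem.List.pyGetD cur1 i 0 > 9 then PySem.List.pySetD cur1 i 1 else cur1)
        nr)
    new_row

-- ===== PORT B =====
def create_big_row_alt (row : List Int) (n : Int) : List Int :=
  if n ≤ 0 then row.map (fun a => a)
  else
    let first := row.map (fun v => if v < 9 then v + 1 else 1)
    let m := n - 1
    first.map (fun v => if v + m ≤ 9 then v + m else PySem.Int.mod (v + m - 1) 9 + 1)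

-- ===== PRECONDITION & SPEC =====
def Spec_create_big_row (row : List Int) (n : Int) (out : List Int) : Prop := out = create_big_row_alt row n
instance (row : List Int) (n : Int) (out : List Int) : Decidable (Spec_create_big_row row n out) := by unfold Spec_create_big_row; infer_instance

-- ===== CLAIM (what is proved, stated in full; the proofs are below) =====
def Claim_equal_create_big_row : Prop := ∀ (row : List Int) (n : Int), Dom_create_big_row row n → Spec_create_big_row row n (create_big_row row n)

-- ===== LEMMAS AND PROOFS =====

/-- One increment-with-wrap step on a single cell, as A's inner loop body does per index. -/
def pvStep (v : Int) : Int := if v + 1 > 9 then 1 else v + 1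

lemma pv_getD_mid (done rest : List Int) (s : Int) :
    (done ++ s :: rest).getD done.length 0 = s := by
  simp [List.getD]

lemma pv_set_mid (done rest : List Int) (s v : Int) :
    (done ++ s :: rest).set done.length v = done ++ v :: rest := by
  induction done with
  | nil => simp
  | cons d ds ih => simp [ih]

/-- A's inner index loop maps `pvStep` over the untouched suffix. -/
lemma pv_inner (suf : List Int) : ∀ (done : List Int),
    (PySem.List.pyRange (done.length : Int) ((done.length : Int) + (suf.length : Int)) 1).foldl
      (fun cur i =>
        let cur1 := PySem.List.pySetD cur i (PySem.List.pyGetD cur i 0 + 1)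
        if PySem.List.pyGetD cur1 i 0 > 9 then PySem.List.pySetD cur1 i 1 else cur1)
      (done ++ suf)
    = done ++ suf.map pvStep := by
  induction suf with
  | nil => intro done; simp [PySem.List.pyRange_one_eq_nil]
  | cons s rest ih =>
    intro done
    rw [PySem.List.pyRange_one_cons (by simp)]
    simp only [List.foldl_cons]
    have hbody :
        (let cur1 := PySem.List.pySetD (done ++ s :: rest) (done.length : Int)
            (PySem.List.pyGetD (done ++ s :: rest) (done.length : Int) 0 + 1)
         if PySem.List.pyGetD cur1 (done.length : Int) 0 > 9 then
            PySem.List.pySetD cur1 (done.length : Int) 1 else cur1)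
        = done ++ pvStep s :: rest := by
      simp only [PySem.List.pySetD_natCast, PySem.List.pyGetD_natCast,
        pv_getD_mid, pv_set_mid, pvStep]
      split_ifs <;> simp
    rw [hbody]
    have := ih (done ++ [pvStep s])
    simpa [List.append_assoc, add_comm, add_assoc, add_left_comm] using this

/-- Folding the inner loop m times is mapping `pvStep^[m]`. -/
lemma pv_outer (L : List Int) : ∀ (xs : List Int),
    L.foldl (fun nr _ =>
      (PySem.List.pyRange 0 (nr.length : Int) 1).foldl
        (fun cur i =>
          let cur1 := PySem.List.pySetD cur i (PySem.List.pyGetD cur i 0 + 1)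
          if PySem.List.pyGetD cur1 i 0 > 9 then PySem.List.pySetD cur1 i 1 else cur1)
        nr) xs
    = xs.map (pvStep^[L.length]) := by
  induction L with
  | nil => intro xs; simp
  | cons a L ih =>
    intro xs
    simp only [List.foldl_cons]
    have hin : (PySem.List.pyRange 0 ((xs.length : Int)) 1).foldl
        (fun cur i =>
          let cur1 := PySem.List.pySetD cur i (PySem.List.pyGetD cur i 0 + 1)
          if PySem.List.pyGetD cur1 i 0 > 9 then PySem.List.pySetD cur1 i 1 else cur1)
        xs = xs.map pvStep := by
      simpa using pv_inner xs []
    rw [hin, ih]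
    simp [List.map_map]

lemma pv_no_wrap : ∀ (k : Nat) (v : Int), v + k ≤ 9 → pvStep^[k] v = v + k := by
  intro k
  induction k with
  | zero => intro v _; simp
  | succ k ih =>
    intro v h
    rw [Function.iterate_succ_apply]
    have hs : pvStep v = v + 1 := by unfold pvStep; split_ifs with h1 <;> push_cast at h <;> omega
    rw [hs, ih (v + 1) (by push_cast at h ⊢; omega)]
    push_cast; ring

lemma pv_cycle : ∀ (m : Nat) (w : Int), 1 ≤ w → w ≤ 9 → pvStep^[m] w = (w - 1 + m) % 9 + 1 := by
  intro m
  induction m with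
  | zero => intro w h1 h9; simp; omega
  | succ m ih =>
    intro w h1 h9
    rw [Function.iterate_succ_apply]
    by_cases hw : w = 9
    · subst hw
      have : pvStep 9 = 1 := by decide
      rw [this, ih 1 (by omega) (by omega)]
      push_cast; omega
    · have : pvStep w = w + 1 := by unfold pvStep; split_ifs with h' <;> omega
      rw [this, ih (w + 1) (by omega) (by omega)]
      push_cast; omega

/-- Closed form for iterating the step on any value already ≤ 9. -/
lemma pv_closed (m : Nat) (w : Int) (hw : w ≤ 9) :
    pvStep^[m] w = if w + m ≤ 9 then w + m else (w + m - 1) % 9 + 1 := by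
  split_ifs with hle
  · exact pv_no_wrap m w hle
  · set j : Nat := (9 - w).toNat with hj
    have hjw : (j : Int) = 9 - w := by omega
    obtain ⟨r, hr⟩ : ∃ r, m = r + j := ⟨m - j, by omega⟩
    subst hr
    rw [Function.iterate_add_apply]
    rw [pv_no_wrap j w (by omega)]
    have h9 : w + (j : Int) = 9 := by omega
    rw [h9, pv_cycle r 9 (by omega) (by omega)]
    push_cast
    omega

-- ===== VERDICT (by name: the statement is the Claim_ definition above) =====
theorem create_big_row_spec : Claim_equal_create_big_row := by
  intro row n _
  unfold Spec_create_big_row create_big_row create_big_row_alt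
  simp only []
  rw [pv_outer]
  by_cases hn : n ≤ 0
  · rw [if_pos hn]
    have : PySem.List.pyRange 0 n 1 = [] := PySem.List.pyRange_one_eq_nil (by omega)
    simp [this]
  · rw [if_neg hn]
    have hlen : (PySem.List.pyRange 0 n 1).length = n.toNat := by
      simp [PySem.List.length_pyRange_one]
    rw [hlen]
    simp only [List.map_map]
    apply List.map_congr_left
    intro v _
    simp only [Function.comp_apply]
    obtain ⟨k, hk⟩ : ∃ k, n.toNat = k + 1 := ⟨n.toNat - 1, by omega⟩
    rw [hk, Function.iterate_succ_apply]
    have hstep : pvStep v = if v < 9 then v + 1 else 1 := by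
      unfold pvStep; split_ifs <;> omega
    have hle9 : pvStep v ≤ 9 := by rw [hstep]; split_ifs <;> omega
    rw [pv_closed k (pvStep v) hle9, hstep]
    have hkc : (k : Int) = n - 1 := by omega
    rw [hkc, PySem.Int.mod_eq_emod_of_pos (by norm_num)]
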